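-- pv_equiv track=rewrite | github.com/laracmv/Academia-Python | academia python/7for/medio/maioraboborahalloween.py | maior_abobora
-- ===== SOURCE A (Python) =====
-- def maior_abobora(especie,  lista):
--     max = -1
--     indice = -1
--     if lista == []:
--         return indice
--     else:
--         for fazendeiros in lista:
--             for abobora in fazendeiros:
--                 if abobora[1] == especie:
--                     if abobora[0] > max:
--                         indice = lista.index(fazendeiros)
--                         max = abobora[0]
--                     elif abobora[0] == max:
--                         indice = indice
--     return indice
-- ===== SOURCE B (Python) =====
-- def maior_abobora(especie, lista):
--     best = [max([ab[0] for ab in faz if ab[1] == especie] + [-1]) for faz in lista]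
--     melhor = max(best, default=-1)
--     return best.index(melhor) if melhor > -1 else -1
-- ===== Notes on version B (the rewrite author's own statement) =====
-- stated objective: alternative
-- what changed: Replaces the running-max nested loop with repeated lista.index scans by a per-farmer best table followed by one overall max and a single best.index lookup.
import Mathlib
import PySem

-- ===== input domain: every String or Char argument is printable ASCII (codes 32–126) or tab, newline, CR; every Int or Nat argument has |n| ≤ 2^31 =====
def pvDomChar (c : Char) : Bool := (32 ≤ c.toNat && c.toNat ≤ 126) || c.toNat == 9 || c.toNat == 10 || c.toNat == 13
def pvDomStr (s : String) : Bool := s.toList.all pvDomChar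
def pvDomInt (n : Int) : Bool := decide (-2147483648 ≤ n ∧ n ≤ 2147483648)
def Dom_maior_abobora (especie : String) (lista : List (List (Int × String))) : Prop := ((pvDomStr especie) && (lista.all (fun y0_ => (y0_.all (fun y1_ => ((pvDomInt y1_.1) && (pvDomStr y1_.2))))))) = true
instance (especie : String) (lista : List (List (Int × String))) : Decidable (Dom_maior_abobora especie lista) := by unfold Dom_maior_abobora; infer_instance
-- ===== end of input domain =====

-- B replaces A's running-max nested loop (which rescans lista with lista.index on every improvement)
-- by a per-farmer best table, one overall max, and a single index lookup (objective: alternative).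

-- ===== PORT A =====
-- one step of A's inner loop over a farmer's pumpkins; state = (max, indice)
def pvStepA (especie : String) (lista : List (List (Int × String)))
    (faz : List (Int × String)) (st : Int × Int) (ab : Int × String) : Int × Int :=
  if ab.2 == especie then
    if ab.1 > st.1 then
      (ab.1, match PySem.List.index? lista faz with | some k => (k : Int) | none => st.2)
    else if ab.1 == st.1 then (st.1, st.2)
    else st
  else st

def maior_abobora (especie : String) (lista : List (List (Int × String))) : Int :=
  if lista = [] then (-1 : Int)
  else
    (lista.foldl (fun st faz => faz.foldl (pvStepA especie lista faz) st) ((-1 : Int), (-1 : Int))).2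

-- ===== PORT B =====
-- best entry for one farmer: max([ab[0] for ab in faz if ab[1]==especie] + [-1])
def pvBestB (especie : String) (faz : List (Int × String)) : Int :=
  (PySem.List.max? (((faz.filter (fun ab => ab.2 == especie)).map Prod.fst) ++ [(-1 : Int)]) (fun y => y)).getD (-1)

def maior_abobora_alt (especie : String) (lista : List (List (Int × String))) : Int :=
  let best := lista.map (pvBestB especie)
  let melhor := (PySem.List.max? best (fun y => y)).getD (-1)
  if melhor > -1 then
    match PySem.List.index? best melhor with
    | some k => (k : Int)
    | none => -1   -- unreachable: melhor is attained in best
  else -1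

-- ===== PRECONDITION & SPEC =====
def Spec_maior_abobora (especie : String) (lista : List (List (Int × String))) (out : Int) : Prop := out = maior_abobora_alt especie lista
instance (especie : String) (lista : List (List (Int × String))) (out : Int) : Decidable (Spec_maior_abobora especie lista out) := by unfold Spec_maior_abobora; infer_instance

-- ===== CLAIM (what is proved, stated in full; the proofs are below) =====
def Claim_equal_maior_abobora : Prop := ∀ (especie : String) (lista : List (List (Int × String))), Dom_maior_abobora especie lista → Spec_maior_abobora especie lista (maior_abobora especie lista)

-- ===== LEMMAS AND PROOFS =====

-- per-farmer best as a plain running-max fold (reference form used by the invariant)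
def pvBst (especie : String) (faz : List (Int × String)) : Int :=
  ((faz.filter (fun ab => ab.2 == especie)).map Prod.fst).foldl max (-1)

theorem pv_foldl_max_shift (s : List Int) (a b : Int) :
    s.foldl max (max a b) = max a (s.foldl max b) := by
  induction s generalizing b with
  | nil => simp
  | cons x t ih => simp [List.foldl_cons, max_assoc, ih]

theorem pv_bst_ge (especie : String) (faz : List (Int × String)) :
    (-1 : Int) ≤ pvBst especie faz :=
  (PySem.List.le_foldl_max _ _).1

theorem pv_bst_eq_bestB (especie : String) (faz : List (Int × String)) :
    pvBestB especie faz = pvBst especie faz := by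
  unfold pvBestB pvBst
  cases h : (faz.filter (fun ab => ab.2 == especie)).map Prod.fst with
  | nil => simp [PySem.List.max?]
  | cons s0 s' =>
      rw [show s0 :: s' ++ [(-1 : Int)] = s0 :: (s' ++ [(-1 : Int)]) from rfl,
        PySem.List.max?_id_cons]
      simp only [Option.getD_some, List.foldl_cons]
      rw [List.foldl_append]
      simp only [List.foldl_cons, List.foldl_nil]
      rw [max_comm]
      exact (pv_foldl_max_shift s' (-1) s0).symm

theorem pv_attained (l : List Int) (a : Int) (h : a < l.foldl max a) :
    l.foldl max a ∈ l := by
  rcases PySem.List.foldl_max_mem l a with h1 | h1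
  · omega
  · exact h1

-- inner loop collapses to one comparison against the farmer's best
theorem pv_inner (especie : String) (lista : List (List (Int × String)))
    (faz : List (Int × String)) (g : List (Int × String)) :
    ∀ (mx idx : Int), (-1 : Int) ≤ mx →
      g.foldl (pvStepA especie lista faz) (mx, idx) =
        if mx < pvBst especie g
        then (pvBst especie g,
              match PySem.List.index? lista faz with | some k => (k : Int) | none => idx)
        else (mx, idx) := by
  induction g with
  | nil =>
      intro mx idx hmx
      have h : ¬ mx < pvBst especie [] := by simp [pvBst]; omega
      simp [h]
  | cons ab rest ih =>
      intro mx idx hmx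
      by_cases hsp : (ab.2 == especie) = true
      · have hsplit : pvBst especie (ab :: rest) = max ab.1 (pvBst especie rest) := by
          have hf : List.filter (fun ab => ab.2 == especie) (ab :: rest)
              = ab :: List.filter (fun ab => ab.2 == especie) rest := by
            simp [hsp]
          simp only [pvBst]
          rw [hf, List.map_cons, List.foldl_cons,
            show max (-1 : Int) ab.1 = max ab.1 (-1) from max_comm _ _, pv_foldl_max_shift]
        rw [hsplit]
        have hbr1 := pv_bst_ge especie rest
        by_cases hgt : ab.1 > mx
        · have step : pvStepA especie lista faz (mx, idx) ab =
              (ab.1, match PySem.List.index? lista faz with | some k => (k : Int) | none => idx) := by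
            simp [pvStepA, hsp, hgt]
          rw [List.foldl_cons, step, ih _ _ (by omega)]
          by_cases h2 : ab.1 < pvBst especie rest
          · rw [if_pos h2, max_eq_right (le_of_lt h2), if_pos (by omega)]
            cases PySem.List.index? lista faz <;> rfl
          · rw [if_neg h2, max_eq_left (by omega), if_pos hgt]
        · have step : pvStepA especie lista faz (mx, idx) ab = (mx, idx) := by
            by_cases heq : (ab.1 == mx) = true <;> simp [pvStepA, hsp, hgt, heq]
          rw [List.foldl_cons, step, ih _ _ hmx]
          rcases le_total ab.1 (pvBst especie rest) with h | h
          · rw [max_eq_right h]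
          · rw [max_eq_left h, if_neg (by omega), if_neg (by omega)]
      · have hskip : pvBst especie (ab :: rest) = pvBst especie rest := by
          simp [pvBst, hsp]
        have step : pvStepA especie lista faz (mx, idx) ab = (mx, idx) := by
          simp [pvStepA, hsp]
        rw [List.foldl_cons, step, ih _ _ hmx, hskip]

-- index? of f in pre ++ f :: rest is pre.length when f is not in pre
theorem pv_index_mid {α : Type} [BEq α] [LawfulBEq α] (pre rest : List α) (f : α) (h : f ∉ pre) :
    PySem.List.index? (pre ++ f :: rest) f = some pre.length :=
  (PySem.List.index?_eq_some_iff _ _ _).2 ⟨pre, rest, rfl, rfl, h⟩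

-- outer loop invariant: A's fold over the suffix, when every farmer already
-- processed (the prefix) has best ≤ mx
theorem pv_outer (especie : String) (lista : List (List (Int × String))) :
    ∀ (suf pre : List (List (Int × String))) (mx idx : Int),
      lista = pre ++ suf → (-1 : Int) ≤ mx →
      (∀ f ∈ pre, pvBst especie f ≤ mx) →
      suf.foldl (fun st faz => faz.foldl (pvStepA especie lista faz) st) (mx, idx) =
        ((suf.map (pvBst especie)).foldl max mx,
         if mx < (suf.map (pvBst especie)).foldl max mx
         then ((pre.length : Int) +
               (((PySem.List.index? (suf.map (pvBst especie))
                    ((suf.map (pvBst especie)).foldl max mx)).getD 0 : Nat) : Int))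
         else idx) := by
  intro suf
  induction suf with
  | nil =>
      intro pre mx idx hl hmx hpre
      simp only [List.foldl_nil, List.map_nil]
      simp
  | cons f rest ih =>
      intro pre mx idx hl hmx hpre
      rw [List.foldl_cons, pv_inner especie lista f f mx idx hmx]
      have hbf1 : (-1 : Int) ≤ pvBst especie f := pv_bst_ge especie f
      simp only [List.map_cons, List.foldl_cons]
      by_cases hgt : mx < pvBst especie f
      · rw [if_pos hgt]
        have hfnot : f ∉ pre := fun hmem => by have := hpre f hmem; omega
        have hidx : PySem.List.index? lista f = some pre.length := by
          rw [hl]; exact pv_index_mid pre rest f hfnot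
        have hmatch : (match PySem.List.index? lista f with
            | some k => (k : Int) | none => idx) = (pre.length : Int) := by rw [hidx]
        rw [hmatch]
        have hpre' : ∀ g ∈ pre ++ [f], pvBst especie g ≤ pvBst especie f := by
          intro g hg
          rcases List.mem_append.1 hg with h | h
          · have := hpre g h; omega
          · simp at h; subst h; omega
        rw [ih (pre ++ [f]) (pvBst especie f) (pre.length : Int)
              (by rw [hl]; simp) (by omega) hpre']
        rw [max_eq_right (le_of_lt hgt)]
        have hMb : pvBst especie f ≤ (rest.map (pvBst especie)).foldl max (pvBst especie f) :=
          (PySem.List.le_foldl_max _ _).1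
        rw [if_pos (show mx < (rest.map (pvBst especie)).foldl max (pvBst especie f) from
              lt_of_lt_of_le hgt hMb)]
        by_cases h2 : pvBst especie f < (rest.map (pvBst especie)).foldl max (pvBst especie f)
        · rw [if_pos h2]
          have hmem := pv_attained _ _ h2
          cases hj : PySem.List.index? (rest.map (pvBst especie))
              ((rest.map (pvBst especie)).foldl max (pvBst especie f)) with
          | none => exact absurd hmem ((PySem.List.index?_eq_none_iff _ _).1 hj)
          | some j =>
              rw [PySem.List.index?_cons_of_ne _
                    (show pvBst especie f ≠
                        (rest.map (pvBst especie)).foldl max (pvBst especie f) from by omega), hj]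
              simp only [Option.map_some, Option.getD_some, List.length_append,
                List.length_cons, List.length_nil, Prod.mk.injEq]
              refine ⟨trivial, ?_⟩
              push_cast; ring
        · have hMeq : (rest.map (pvBst especie)).foldl max (pvBst especie f) = pvBst especie f := by
            omega
          rw [if_neg h2, hMeq, PySem.List.index?_cons_self]
          simp
      · rw [if_neg hgt]
        have hpre' : ∀ g ∈ pre ++ [f], pvBst especie g ≤ mx := by
          intro g hg
          rcases List.mem_append.1 hg with h | h
          · exact hpre g h
          · simp at h; subst h; omega
        rw [ih (pre ++ [f]) mx idx (by rw [hl]; simp) hmx hpre']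
        rw [max_eq_left (by omega)]
        by_cases h2 : mx < (rest.map (pvBst especie)).foldl max mx
        · rw [if_pos h2, if_pos h2]
          have hmem := pv_attained _ _ h2
          cases hj : PySem.List.index? (rest.map (pvBst especie))
              ((rest.map (pvBst especie)).foldl max mx) with
          | none => exact absurd hmem ((PySem.List.index?_eq_none_iff _ _).1 hj)
          | some j =>
              rw [PySem.List.index?_cons_of_ne _
                    (show pvBst especie f ≠
                        (rest.map (pvBst especie)).foldl max mx from by omega), hj]
              simp only [Option.map_some, Option.getD_some, List.length_append,
                List.length_cons, List.length_nil, Prod.mk.injEq]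
              refine ⟨trivial, ?_⟩
              push_cast; ring
        · rw [if_neg h2, if_neg h2]

-- ===== VERDICT (by name: the statement is the Claim_ definition above) =====
theorem maior_abobora_spec : Claim_equal_maior_abobora := by
  intro especie lista _
  unfold Spec_maior_abobora maior_abobora maior_abobora_alt
  cases lista with
  | nil => simp [PySem.List.max?]
  | cons f0 rest =>
      rw [if_neg (by simp)]
      rw [pv_outer especie (f0 :: rest) (f0 :: rest) [] (-1) (-1) rfl (by omega) (by simp)]
      have hbest : (f0 :: rest).map (pvBestB especie) = (f0 :: rest).map (pvBst especie) :=
        List.map_congr_left (fun f _ => pv_bst_eq_bestB especie f)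
      rw [hbest]
      simp only [List.map_cons, List.foldl_cons, PySem.List.max?_id_cons, Option.getD_some,
        List.length_nil]
      rw [max_eq_right (pv_bst_ge especie f0)]
      by_cases hM : (-1 : Int) < (rest.map (pvBst especie)).foldl max (pvBst especie f0)
      · rw [if_pos hM, if_pos (show (rest.map (pvBst especie)).foldl max (pvBst especie f0) > -1 from hM)]
        have hmem : (rest.map (pvBst especie)).foldl max (pvBst especie f0) ∈
            pvBst especie f0 :: rest.map (pvBst especie) := by
          rcases PySem.List.foldl_max_mem (rest.map (pvBst especie)) (pvBst especie f0) with h | h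
          · rw [h]; exact List.mem_cons_self
          · exact List.mem_cons_of_mem _ h
        cases hj : PySem.List.index? (pvBst especie f0 :: rest.map (pvBst especie))
            ((rest.map (pvBst especie)).foldl max (pvBst especie f0)) with
        | none => exact absurd hmem ((PySem.List.index?_eq_none_iff _ _).1 hj)
        | some j => simp
      · rw [if_neg hM, if_neg (by omega)]
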